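-- pv_equiv track=rewrite | github.com/jon-gauntlet/aether | src/rlq0.py | _map_category
-- ===== SOURCE A (Python) =====
-- from typing import Any, Dict, List, Optional
--
-- def _map_category(issue: Dict[str, Any]) -> str:
--     """Map Burp Suite issue to security category.
--
--     Args:
--         issue: Burp Suite issue dictionary
--
--     Returns:
--         Normalized security category
--     """
--     name = issue.get('issue_name', '').lower()
--     desc = issue.get('issue_detail', '').lower()
--
--     if 'xss' in name or 'cross site scripting' in name:
--         return '7. XSS'
--     elif any(x in name or x in desc for x in ['sql', 'command', 'code', 'injection', 'traversal']):
--         return '6. Injection'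
--     elif any(x in name or x in desc for x in ['auth', 'login', 'password', 'credential']):
--         return '2. Authentication'
--     elif any(x in name or x in desc for x in ['session', 'cookie', 'token']):
--         return '3. Session Management'
--     elif any(x in name or x in desc for x in ['csrf', 'forgery']):
--         return '4. CSRF'
--     elif any(x in name or x in desc for x in ['disclosure', 'information', 'version', 'error']):
--         return '5. Information Disclosure'
--     elif any(x in name or x in desc for x in ['header', 'security policy', 'csp', 'hsts', 'ssl', 'tls']):
--         return '8. Security Headers'
--
--     return '10. Other'
-- ===== SOURCE B (Python) =====
-- # Min-rank scoring: score every keyword, keep the lowest category rank, then one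
-- # table lookup -- a reduction over a flat keyword table instead of an if/elif cascade.
-- _KEYWORDS = [
--     ('xss', 0, False), ('cross site scripting', 0, False),
--     ('sql', 1, True), ('command', 1, True), ('code', 1, True), ('injection', 1, True), ('traversal', 1, True),
--     ('auth', 2, True), ('login', 2, True), ('password', 2, True), ('credential', 2, True),
--     ('session', 3, True), ('cookie', 3, True), ('token', 3, True),
--     ('csrf', 4, True), ('forgery', 4, True),
--     ('disclosure', 5, True), ('information', 5, True), ('version', 5, True), ('error', 5, True),
--     ('header', 6, True), ('security policy', 6, True), ('csp', 6, True), ('hsts', 6, True), ('ssl', 6, True), ('tls', 6, True),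
-- ]
-- _CATS = {0: '7. XSS', 1: '6. Injection', 2: '2. Authentication', 3: '3. Session Management',
--          4: '4. CSRF', 5: '5. Information Disclosure', 6: '8. Security Headers'}
--
-- def _map_category(issue):
--     name = issue.get('issue_name', '').lower()
--     desc = issue.get('issue_detail', '').lower()
--     best = 99
--     for kw, rank, in_desc in _KEYWORDS:
--         if rank < best and (kw in name or (in_desc and kw in desc)):
--             best = rank
--     return _CATS.get(best, '10. Other')
-- ===== Notes on version B (the rewrite author's own statement) =====
-- stated objective: alternative
-- what changed: Replaces the first-match if/elif cascade by a min-rank reduction: every keyword in a flat table is scored against the issue, the lowest matching category rank is kept in an accumulator (no early return), and one final rank-to-category dict lookup produces the answer.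
import Mathlib
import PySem

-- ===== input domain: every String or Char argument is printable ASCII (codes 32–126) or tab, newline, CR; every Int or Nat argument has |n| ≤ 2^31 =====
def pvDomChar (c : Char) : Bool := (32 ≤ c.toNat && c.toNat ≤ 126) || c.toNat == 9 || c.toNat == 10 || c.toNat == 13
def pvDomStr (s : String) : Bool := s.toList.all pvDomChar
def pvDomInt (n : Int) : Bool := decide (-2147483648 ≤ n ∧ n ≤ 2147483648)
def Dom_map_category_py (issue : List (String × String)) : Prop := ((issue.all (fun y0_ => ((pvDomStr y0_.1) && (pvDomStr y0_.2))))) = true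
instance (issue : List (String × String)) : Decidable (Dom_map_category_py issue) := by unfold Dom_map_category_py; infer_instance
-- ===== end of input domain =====

-- B replaces A's if/elif cascade by a min-rank reduction over a flat keyword table
-- followed by one rank->category lookup; objective: alternative decomposition, same cost.

-- ===== PORT A =====
def map_category_py (issue : List (String × String)) : String :=
  let d : PySem.Dict String String := PySem.Dict.mk issue
  let name := PySem.Str.lower (d.getD "issue_name" "")
  let desc := PySem.Str.lower (d.getD "issue_detail" "")
  if PySem.Str.isIn "xss" name || PySem.Str.isIn "cross site scripting" name then "7. XSS"
  else if (["sql", "command", "code", "injection", "traversal"].any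
      (fun x => PySem.Str.isIn x name || PySem.Str.isIn x desc)) then "6. Injection"
  else if (["auth", "login", "password", "credential"].any
      (fun x => PySem.Str.isIn x name || PySem.Str.isIn x desc)) then "2. Authentication"
  else if (["session", "cookie", "token"].any
      (fun x => PySem.Str.isIn x name || PySem.Str.isIn x desc)) then "3. Session Management"
  else if (["csrf", "forgery"].any
      (fun x => PySem.Str.isIn x name || PySem.Str.isIn x desc)) then "4. CSRF"
  else if (["disclosure", "information", "version", "error"].any
      (fun x => PySem.Str.isIn x name || PySem.Str.isIn x desc)) then "5. Information Disclosure"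
  else if (["header", "security policy", "csp", "hsts", "ssl", "tls"].any
      (fun x => PySem.Str.isIn x name || PySem.Str.isIn x desc)) then "8. Security Headers"
  else "10. Other"

-- ===== PORT B =====
def pvKeywords : List (String × Int × Bool) :=
  [ ("xss", 0, false), ("cross site scripting", 0, false),
    ("sql", 1, true), ("command", 1, true), ("code", 1, true), ("injection", 1, true), ("traversal", 1, true),
    ("auth", 2, true), ("login", 2, true), ("password", 2, true), ("credential", 2, true),
    ("session", 3, true), ("cookie", 3, true), ("token", 3, true),
    ("csrf", 4, true), ("forgery", 4, true),
    ("disclosure", 5, true), ("information", 5, true), ("version", 5, true), ("error", 5, true),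
    ("header", 6, true), ("security policy", 6, true), ("csp", 6, true), ("hsts", 6, true), ("ssl", 6, true), ("tls", 6, true) ]

def pvCats : PySem.Dict Int String :=
  PySem.Dict.mk [(0, "7. XSS"), (1, "6. Injection"), (2, "2. Authentication"),
    (3, "3. Session Management"), (4, "4. CSRF"), (5, "5. Information Disclosure"),
    (6, "8. Security Headers")]

def map_category_py_alt (issue : List (String × String)) : String :=
  let d : PySem.Dict String String := PySem.Dict.mk issue
  let name := PySem.Str.lower (d.getD "issue_name" "")
  let desc := PySem.Str.lower (d.getD "issue_detail" "")
  let best := pvKeywords.foldl (fun best e =>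
    if e.2.1 < best && (PySem.Str.isIn e.1 name || (e.2.2 && PySem.Str.isIn e.1 desc)) then e.2.1
    else best) 99
  pvCats.getD best "10. Other"

-- ===== PRECONDITION & SPEC =====
def Spec_map_category_py (issue : List (String × String)) (out : String) : Prop := out = map_category_py_alt issue
instance (issue : List (String × String)) (out : String) : Decidable (Spec_map_category_py issue out) := by unfold Spec_map_category_py; infer_instance

-- ===== CLAIM =====
def Claim_equal_map_category_py : Prop := ∀ (issue : List (String × String)), Dom_map_category_py issue → Spec_map_category_py issue (map_category_py issue)

-- ===== LEMMAS AND PROOFS =====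
-- For any name/desc, the min-rank fold + lookup computes exactly A's cascade.
theorem pvCore (name desc : String) :
    pvCats.getD
      (pvKeywords.foldl (fun best e =>
        if e.2.1 < best && (PySem.Str.isIn e.1 name || (e.2.2 && PySem.Str.isIn e.1 desc)) then e.2.1
        else best) 99) "10. Other"
    = (if PySem.Str.isIn "xss" name || PySem.Str.isIn "cross site scripting" name then "7. XSS"
  else if (["sql", "command", "code", "injection", "traversal"].any
      (fun x => PySem.Str.isIn x name || PySem.Str.isIn x desc)) then "6. Injection"
  else if (["auth", "login", "password", "credential"].any
      (fun x => PySem.Str.isIn x name || PySem.Str.isIn x desc)) then "2. Authentication"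
  else if (["session", "cookie", "token"].any
      (fun x => PySem.Str.isIn x name || PySem.Str.isIn x desc)) then "3. Session Management"
  else if (["csrf", "forgery"].any
      (fun x => PySem.Str.isIn x name || PySem.Str.isIn x desc)) then "4. CSRF"
  else if (["disclosure", "information", "version", "error"].any
      (fun x => PySem.Str.isIn x name || PySem.Str.isIn x desc)) then "5. Information Disclosure"
  else if (["header", "security policy", "csp", "hsts", "ssl", "tls"].any
      (fun x => PySem.Str.isIn x name || PySem.Str.isIn x desc)) then "8. Security Headers"
  else "10. Other") := by
  by_cases h0 : (PySem.Str.isIn "xss" name) = true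
  · simp_all [pvKeywords, pvCats, PySem.Dict.getD, PySem.Dict.get?, PySem.Dict.mk]
  by_cases h1 : (PySem.Str.isIn "cross site scripting" name) = true
  · simp_all [pvKeywords, pvCats, PySem.Dict.getD, PySem.Dict.get?, PySem.Dict.mk]
  by_cases h2 : (PySem.Str.isIn "sql" name || PySem.Str.isIn "sql" desc) = true
  · simp_all [pvKeywords, pvCats, PySem.Dict.getD, PySem.Dict.get?, PySem.Dict.mk]
  by_cases h3 : (PySem.Str.isIn "command" name || PySem.Str.isIn "command" desc) = true
  · simp_all [pvKeywords, pvCats, PySem.Dict.getD, PySem.Dict.get?, PySem.Dict.mk]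
  by_cases h4 : (PySem.Str.isIn "code" name || PySem.Str.isIn "code" desc) = true
  · simp_all [pvKeywords, pvCats, PySem.Dict.getD, PySem.Dict.get?, PySem.Dict.mk]
  by_cases h5 : (PySem.Str.isIn "injection" name || PySem.Str.isIn "injection" desc) = true
  · simp_all [pvKeywords, pvCats, PySem.Dict.getD, PySem.Dict.get?, PySem.Dict.mk]
  by_cases h6 : (PySem.Str.isIn "traversal" name || PySem.Str.isIn "traversal" desc) = true
  · simp_all [pvKeywords, pvCats, PySem.Dict.getD, PySem.Dict.get?, PySem.Dict.mk]
  by_cases h7 : (PySem.Str.isIn "auth" name || PySem.Str.isIn "auth" desc) = true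
  · simp_all [pvKeywords, pvCats, PySem.Dict.getD, PySem.Dict.get?, PySem.Dict.mk]
  by_cases h8 : (PySem.Str.isIn "login" name || PySem.Str.isIn "login" desc) = true
  · simp_all [pvKeywords, pvCats, PySem.Dict.getD, PySem.Dict.get?, PySem.Dict.mk]
  by_cases h9 : (PySem.Str.isIn "password" name || PySem.Str.isIn "password" desc) = true
  · simp_all [pvKeywords, pvCats, PySem.Dict.getD, PySem.Dict.get?, PySem.Dict.mk]
  by_cases h10 : (PySem.Str.isIn "credential" name || PySem.Str.isIn "credential" desc) = true
  · simp_all [pvKeywords, pvCats, PySem.Dict.getD, PySem.Dict.get?, PySem.Dict.mk]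
  by_cases h11 : (PySem.Str.isIn "session" name || PySem.Str.isIn "session" desc) = true
  · simp_all [pvKeywords, pvCats, PySem.Dict.getD, PySem.Dict.get?, PySem.Dict.mk]
  by_cases h12 : (PySem.Str.isIn "cookie" name || PySem.Str.isIn "cookie" desc) = true
  · simp_all [pvKeywords, pvCats, PySem.Dict.getD, PySem.Dict.get?, PySem.Dict.mk]
  by_cases h13 : (PySem.Str.isIn "token" name || PySem.Str.isIn "token" desc) = true
  · simp_all [pvKeywords, pvCats, PySem.Dict.getD, PySem.Dict.get?, PySem.Dict.mk]
  by_cases h14 : (PySem.Str.isIn "csrf" name || PySem.Str.isIn "csrf" desc) = true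
  · simp_all [pvKeywords, pvCats, PySem.Dict.getD, PySem.Dict.get?, PySem.Dict.mk]
  by_cases h15 : (PySem.Str.isIn "forgery" name || PySem.Str.isIn "forgery" desc) = true
  · simp_all [pvKeywords, pvCats, PySem.Dict.getD, PySem.Dict.get?, PySem.Dict.mk]
  by_cases h16 : (PySem.Str.isIn "disclosure" name || PySem.Str.isIn "disclosure" desc) = true
  · simp_all [pvKeywords, pvCats, PySem.Dict.getD, PySem.Dict.get?, PySem.Dict.mk]
  by_cases h17 : (PySem.Str.isIn "information" name || PySem.Str.isIn "information" desc) = true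
  · simp_all [pvKeywords, pvCats, PySem.Dict.getD, PySem.Dict.get?, PySem.Dict.mk]
  by_cases h18 : (PySem.Str.isIn "version" name || PySem.Str.isIn "version" desc) = true
  · simp_all [pvKeywords, pvCats, PySem.Dict.getD, PySem.Dict.get?, PySem.Dict.mk]
  by_cases h19 : (PySem.Str.isIn "error" name || PySem.Str.isIn "error" desc) = true
  · simp_all [pvKeywords, pvCats, PySem.Dict.getD, PySem.Dict.get?, PySem.Dict.mk]
  by_cases h20 : (PySem.Str.isIn "header" name || PySem.Str.isIn "header" desc) = true
  · simp_all [pvKeywords, pvCats, PySem.Dict.getD, PySem.Dict.get?, PySem.Dict.mk]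
  by_cases h21 : (PySem.Str.isIn "security policy" name || PySem.Str.isIn "security policy" desc) = true
  · simp_all [pvKeywords, pvCats, PySem.Dict.getD, PySem.Dict.get?, PySem.Dict.mk]
  by_cases h22 : (PySem.Str.isIn "csp" name || PySem.Str.isIn "csp" desc) = true
  · simp_all [pvKeywords, pvCats, PySem.Dict.getD, PySem.Dict.get?, PySem.Dict.mk]
  by_cases h23 : (PySem.Str.isIn "hsts" name || PySem.Str.isIn "hsts" desc) = true
  · simp_all [pvKeywords, pvCats, PySem.Dict.getD, PySem.Dict.get?, PySem.Dict.mk]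
  by_cases h24 : (PySem.Str.isIn "ssl" name || PySem.Str.isIn "ssl" desc) = true
  · simp_all [pvKeywords, pvCats, PySem.Dict.getD, PySem.Dict.get?, PySem.Dict.mk]
  by_cases h25 : (PySem.Str.isIn "tls" name || PySem.Str.isIn "tls" desc) = true
  · simp_all [pvKeywords, pvCats, PySem.Dict.getD, PySem.Dict.get?, PySem.Dict.mk]
  simp_all [pvKeywords, pvCats, PySem.Dict.getD, PySem.Dict.get?, PySem.Dict.mk]

-- ===== VERDICT =====
theorem map_category_py_spec : Claim_equal_map_category_py := by
  intro issue _
  unfold Spec_map_category_py map_category_py map_category_py_alt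
  exact (pvCore _ _).symm ▸ rfl
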